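-- pv_equiv track=rewrite | github.com/desta-getaw/Customer-Experience-Analytics-for-Fintech-Apps | scripts/keywords.py | manual_cluster
-- ===== SOURCE A (Python) =====
-- from collections import defaultdict
--
-- def manual_cluster(keywords):
--     clusters = defaultdict(list)
--     for kw, _ in keywords:
--         kw_lower = kw.lower()
--         if any(word in kw_lower for word in ["login", "auth", "password"]):
--             clusters["Login Issues"].append(kw)
--         elif any(word in kw_lower for word in ["slow", "delay", "freeze", "lag"]):
--             clusters["Performance"].append(kw)
--         elif any(word in kw_lower for word in ["ui", "interface", "layout", "design"]):
--             clusters["UI Feedback"].append(kw)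
--         elif any(word in kw_lower for word in ["transfer", "send", "transaction", "payment"]):
--             clusters["Transactions"].append(kw)
--         elif any(word in kw_lower for word in ["crash", "bug", "error"]):
--             clusters["App Errors"].append(kw)
--         else:
--             clusters["Other"].append(kw)
--     return dict(clusters)
-- ===== SOURCE B (Python) =====
-- CATEGORY_TABLE = [
--     ("Login Issues", ["login", "auth", "password"]),
--     ("Performance", ["slow", "delay", "freeze", "lag"]),
--     ("UI Feedback", ["ui", "interface", "layout", "design"]),
--     ("Transactions", ["transfer", "send", "transaction", "payment"]),
--     ("App Errors", ["crash", "bug", "error"]),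
-- ]
--
--
-- def _categorize(kw_lower):
--     for cat, words in CATEGORY_TABLE:
--         if any(w in kw_lower for w in words):
--             return cat
--     return "Other"
--
--
-- def manual_cluster(keywords):
--     # staged passes: label every keyword, derive the key order, then build
--     # each bucket by filtering — no incrementally updated dict.
--     labels = [_categorize(kw.lower()) for kw, _ in keywords]
--     order = []
--     for lab in labels:
--         if lab not in order:
--             order.append(lab)
--     return {
--         cat: [kw for (kw, _), lab in zip(keywords, labels) if lab == cat]
--         for cat in order
--     }
-- ===== Notes on version B (the rewrite author's own statement) =====
-- stated objective: alternative
-- what changed: Replaces A's single pass that incrementally appends into a defaultdict via an if-elif ladder by staged passes: first label every keyword against an ordered category table, then compute the key order as the dedup of the labels, then build each bucket independently by filtering the labelled list.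
import Mathlib
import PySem

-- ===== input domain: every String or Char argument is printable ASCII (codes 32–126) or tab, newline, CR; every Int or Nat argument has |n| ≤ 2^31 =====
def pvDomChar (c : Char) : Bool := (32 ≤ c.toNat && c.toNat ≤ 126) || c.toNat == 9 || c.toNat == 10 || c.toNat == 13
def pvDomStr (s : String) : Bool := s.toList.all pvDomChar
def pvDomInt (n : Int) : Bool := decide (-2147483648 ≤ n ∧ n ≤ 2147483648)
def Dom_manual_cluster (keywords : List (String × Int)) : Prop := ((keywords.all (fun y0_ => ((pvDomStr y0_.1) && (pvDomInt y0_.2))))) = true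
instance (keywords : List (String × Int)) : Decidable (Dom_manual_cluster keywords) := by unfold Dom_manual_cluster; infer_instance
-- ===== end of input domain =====

-- B replaces A's single incremental-dict pass by staged passes (label all keywords,
-- dedup the labels for the key order, build each bucket by filtering); same cost.

-- ===== PORT A =====
def manual_cluster (keywords : List (String × Int)) : List (String × List String) :=
  (keywords.foldl (fun (clusters : PySem.Dict String (List String)) p =>
    let kw := p.1
    let kw_lower := PySem.Str.lower kw
    if (["login", "auth", "password"].any fun w => PySem.Str.isIn w kw_lower) then
      clusters.modify "Login Issues" [] (· ++ [kw])
    else if (["slow", "delay", "freeze", "lag"].any fun w => PySem.Str.isIn w kw_lower) then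
      clusters.modify "Performance" [] (· ++ [kw])
    else if (["ui", "interface", "layout", "design"].any fun w => PySem.Str.isIn w kw_lower) then
      clusters.modify "UI Feedback" [] (· ++ [kw])
    else if (["transfer", "send", "transaction", "payment"].any fun w => PySem.Str.isIn w kw_lower) then
      clusters.modify "Transactions" [] (· ++ [kw])
    else if (["crash", "bug", "error"].any fun w => PySem.Str.isIn w kw_lower) then
      clusters.modify "App Errors" [] (· ++ [kw])
    else
      clusters.modify "Other" [] (· ++ [kw])) PySem.Dict.empty).items

-- ===== PORT B =====
def pvCategoryTable : List (String × List String) :=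
  [("Login Issues", ["login", "auth", "password"]),
   ("Performance", ["slow", "delay", "freeze", "lag"]),
   ("UI Feedback", ["ui", "interface", "layout", "design"]),
   ("Transactions", ["transfer", "send", "transaction", "payment"]),
   ("App Errors", ["crash", "bug", "error"])]

-- Source B's _categorize: first table entry one of whose words occurs in kw_lower, else "Other"
def pvCategorize : List (String × List String) → String → String
  | [], _ => "Other"
  | (cat, words) :: rest, kwl =>
      if words.any (fun w => PySem.Str.isIn w kwl) then cat else pvCategorize rest kwl

def manual_cluster_alt (keywords : List (String × Int)) : List (String × List String) :=
  let labels := keywords.map (fun p => pvCategorize pvCategoryTable (PySem.Str.lower p.1))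
  let order := labels.foldl (fun acc lab => if acc.contains lab then acc else acc ++ [lab]) []
  order.map (fun cat =>
    (cat, ((keywords.zip labels).filter (fun q => q.2 == cat)).map (fun q => q.1.1)))

-- ===== PRECONDITION & SPEC =====
def Spec_manual_cluster (keywords : List (String × Int)) (out : List (String × List String)) : Prop := out = manual_cluster_alt keywords
instance (keywords : List (String × Int)) (out : List (String × List String)) : Decidable (Spec_manual_cluster keywords out) := by unfold Spec_manual_cluster; infer_instance

-- ===== CLAIM (what is proved, stated in full; the proofs are below) =====
def Claim_equal_manual_cluster : Prop := ∀ (keywords : List (String × Int)), Dom_manual_cluster keywords → Spec_manual_cluster keywords (manual_cluster keywords)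

-- ===== LEMMAS AND PROOFS =====

-- A's if-elif ladder computes Source B's table lookup
theorem pvStep_eq (clusters : PySem.Dict String (List String)) (p : String × Int) :
    (let kw := p.1
     let kw_lower := PySem.Str.lower kw
     if (["login", "auth", "password"].any fun w => PySem.Str.isIn w kw_lower) then
       clusters.modify "Login Issues" [] (· ++ [kw])
     else if (["slow", "delay", "freeze", "lag"].any fun w => PySem.Str.isIn w kw_lower) then
       clusters.modify "Performance" [] (· ++ [kw])
     else if (["ui", "interface", "layout", "design"].any fun w => PySem.Str.isIn w kw_lower) then
       clusters.modify "UI Feedback" [] (· ++ [kw])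
     else if (["transfer", "send", "transaction", "payment"].any fun w => PySem.Str.isIn w kw_lower) then
       clusters.modify "Transactions" [] (· ++ [kw])
     else if (["crash", "bug", "error"].any fun w => PySem.Str.isIn w kw_lower) then
       clusters.modify "App Errors" [] (· ++ [kw])
     else
       clusters.modify "Other" [] (· ++ [kw])) =
    clusters.modify (pvCategorize pvCategoryTable (PySem.Str.lower p.1)) [] (· ++ [p.1]) := by
  simp only [pvCategorize, pvCategoryTable]
  split_ifs <;> rfl

theorem pvZip_map {α β : Type} (f : α → β) (l : List α) :
    l.zip (l.map f) = l.map (fun x => (x, f x)) := by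
  induction l with
  | nil => rfl
  | cons a t ih => simp [ih]

theorem pvOrder_eq (labels : List String) :
    labels.foldl (fun acc lab => if acc.contains lab then acc else acc ++ [lab]) [] =
      PySem.Set.update [] labels := by
  have h : (fun (acc : List String) lab => if acc.contains lab then acc else acc ++ [lab]) =
      PySem.Set.add :=
    funext fun a => funext fun x => by simp [PySem.Set.add, PySem.Set.contains]
  rw [h]; rfl

-- ===== VERDICT (by name: the statement is the Claim_ definition above) =====
theorem manual_cluster_spec : Claim_equal_manual_cluster := by
  intro keywords _
  unfold Spec_manual_cluster manual_cluster manual_cluster_alt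
  have hstep : (fun (clusters : PySem.Dict String (List String)) (p : String × Int) =>
      let kw := p.1
      let kw_lower := PySem.Str.lower kw
      if (["login", "auth", "password"].any fun w => PySem.Str.isIn w kw_lower) then
        clusters.modify "Login Issues" [] (· ++ [kw])
      else if (["slow", "delay", "freeze", "lag"].any fun w => PySem.Str.isIn w kw_lower) then
        clusters.modify "Performance" [] (· ++ [kw])
      else if (["ui", "interface", "layout", "design"].any fun w => PySem.Str.isIn w kw_lower) then
        clusters.modify "UI Feedback" [] (· ++ [kw])
      else if (["transfer", "send", "transaction", "payment"].any fun w => PySem.Str.isIn w kw_lower) then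
        clusters.modify "Transactions" [] (· ++ [kw])
      else if (["crash", "bug", "error"].any fun w => PySem.Str.isIn w kw_lower) then
        clusters.modify "App Errors" [] (· ++ [kw])
      else
        clusters.modify "Other" [] (· ++ [kw])) =
      (fun (clusters : PySem.Dict String (List String)) (p : String × Int) =>
        clusters.modify (pvCategorize pvCategoryTable (PySem.Str.lower p.1)) [] (· ++ [p.1])) :=
    funext fun c => funext fun p => pvStep_eq c p
  rw [hstep]
  set lbl : (String × Int) → String := fun p => pvCategorize pvCategoryTable (PySem.Str.lower p.1)
  set d := keywords.foldl (fun (d : PySem.Dict String (List String)) p =>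
      d.modify (lbl p) [] (· ++ [p.1])) PySem.Dict.empty with hd
  have hnodup : d.keys.Nodup := by
    rw [hd]
    exact PySem.Dict.nodup_keys_foldl_modify_key keywords lbl []
      (fun _ p v => v ++ [p.1]) PySem.Dict.empty PySem.Dict.nodup_keys_empty
  have hkeys : d.keys = PySem.Set.update [] (keywords.map lbl) := by
    rw [hd]
    have := PySem.Dict.keys_foldl_modify_key keywords lbl []
      (fun _ p v => v ++ [p.1]) PySem.Dict.empty
    simpa [PySem.Dict.keys_empty] using this
  have hgetD : ∀ c, d.getD c [] = (keywords.filter (fun p => lbl p == c)).map (fun p => p.1) := by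
    intro c
    have hfold : d = (keywords.map (fun p => (lbl p, p.1))).foldl
        (fun (d : PySem.Dict String (List String)) q => d.modify q.1 [] (· ++ [q.2]))
        PySem.Dict.empty := by
      rw [hd, List.foldl_map]
    rw [hfold, PySem.Dict.getD_foldl_modify_append]
    simp [PySem.Dict.getD_empty, List.filter_map, Function.comp_def]
  rw [PySem.Dict.items_eq_map_keys d hnodup [], hkeys]
  simp only [pvOrder_eq]
  apply List.map_congr_left
  intro c _
  rw [hgetD]
  congr 1
  rw [pvZip_map, List.filter_map, List.map_map]
  simp [Function.comp_def]
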